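-- pv_equiv track=rewrite | github.com/Deadcoder001/DSP-lab | string_replace_duplicate.py | replace_duplicate_occurrence
-- ===== SOURCE A (Python) =====
-- def replace_duplicate_occurrence(input_string):
--     char_count = {}
--     result = []
--
--     for char in input_string:
--         if char in char_count:
--             char_count[char] += 1
--             if char_count[char] == 2:
--                 result.append('$')
--             else:
--                 result.append(char)
--         else:
--             char_count[char] = 1
--             result.append(char)
--
--     return ''.join(result)
-- ===== SOURCE B (Python) =====
-- def replace_duplicate_occurrence(input_string):
--     counts = {}
--     replace_positions = set()
--     for i, ch in enumerate(input_string):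
--         counts[ch] = counts.get(ch, 0) + 1
--         if counts[ch] == 2:
--             replace_positions.add(i)
--     return ''.join('$' if i in replace_positions else ch
--                    for i, ch in enumerate(input_string))
-- ===== Notes on version B (the rewrite author's own statement) =====
-- stated objective: alternative
-- what changed: Replaces the single inline-append loop (dict membership test with three branches deciding each output char on the spot) by a two-pass design: one counting pass that records in a set the positions where a character's count reaches exactly 2, then a separate comprehension over enumerate that emits '$' exactly at those positions.
import Mathlib
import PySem

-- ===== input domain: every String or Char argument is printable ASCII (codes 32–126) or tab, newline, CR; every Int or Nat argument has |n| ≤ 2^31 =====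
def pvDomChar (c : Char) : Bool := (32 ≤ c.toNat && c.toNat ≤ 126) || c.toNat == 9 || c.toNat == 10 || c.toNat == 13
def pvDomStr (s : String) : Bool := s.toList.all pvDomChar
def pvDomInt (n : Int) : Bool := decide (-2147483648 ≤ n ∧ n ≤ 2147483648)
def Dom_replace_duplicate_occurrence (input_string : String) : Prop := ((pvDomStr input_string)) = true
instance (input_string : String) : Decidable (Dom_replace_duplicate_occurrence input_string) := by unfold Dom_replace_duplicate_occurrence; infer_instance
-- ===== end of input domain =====

-- B replaces A's single inline-append loop by a two-pass design (count pass recording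
-- replacement positions in a set, then a map over enumerate); alternative, not faster.

-- ===== PORT A =====
-- one step of A's loop body: dict membership test, then the three append branches
def pvStepA (st : PySem.Dict Char Int × List Char) (c : Char) :
    PySem.Dict Char Int × List Char :=
  if st.1.contains c then
    let cc := st.1.insert c (st.1.getD c 0 + 1)
    if cc.getD c 0 == 2 then (cc, st.2 ++ ['$']) else (cc, st.2 ++ [c])
  else (st.1.insert c 1, st.2 ++ [c])

def replace_duplicate_occurrence (input_string : String) : String :=
  let fin := input_string.toList.foldl pvStepA (PySem.Dict.empty, [])
  String.mk fin.2

-- ===== PORT B =====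
-- first pass of B: count each char; record index i in the set when its count hits exactly 2
def pvStepB (st : PySem.Dict Char Int × PySem.Set Int) (p : Int × Char) :
    PySem.Dict Char Int × PySem.Set Int :=
  let counts := st.1.insert p.2 (st.1.getD p.2 0 + 1)
  if counts.getD p.2 0 == 2 then (counts, st.2.add p.1) else (counts, st.2)

def replace_duplicate_occurrence_alt (input_string : String) : String :=
  let cs := input_string.toList
  let fin := (PySem.List.enumerate cs).foldl pvStepB (PySem.Dict.empty, PySem.Set.empty)
  String.mk ((PySem.List.enumerate cs).map (fun p => if fin.2.contains p.1 then '$' else p.2))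

-- ===== PRECONDITION & SPEC =====
def Spec_replace_duplicate_occurrence (input_string : String) (out : String) : Prop := out = replace_duplicate_occurrence_alt input_string
instance (input_string : String) (out : String) : Decidable (Spec_replace_duplicate_occurrence input_string out) := by unfold Spec_replace_duplicate_occurrence; infer_instance

-- ===== CLAIM (what is proved, stated in full; the proofs are below) =====
def Claim_equal_replace_duplicate_occurrence : Prop := ∀ (input_string : String), Dom_replace_duplicate_occurrence input_string → Spec_replace_duplicate_occurrence input_string (replace_duplicate_occurrence input_string)

-- ===== LEMMAS AND PROOFS =====

-- common characterization: output char for c after prefix p is '$' iff p already holds exactly one c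
def pvSpecGo (p : List Char) : List Char → List Char
  | [] => []
  | c :: rest => (if p.count c = 1 then '$' else c) :: pvSpecGo (p ++ [c]) rest

lemma pvA_go (rest : List Char) : ∀ (p : List Char) (d : PySem.Dict Char Int) (res : List Char),
    (∀ c, d.get? c = if p.count c = 0 then none else some ((p.count c : Int))) →
    (rest.foldl pvStepA (d, res)).2 = res ++ pvSpecGo p rest := by
  induction rest with
  | nil => intro p d res _; simp [pvSpecGo]
  | cons c rest ih =>
    intro p d res hinv
    have hc := hinv c
    have hgd : d.getD c 0 = (p.count c : Int) := by
      rw [PySem.Dict.getD_eq_get?_getD, hc]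
      split_ifs with h0
      · simp [h0]
      · simp
    have hcont : d.contains c = decide (p.count c ≠ 0) := by
      rw [PySem.Dict.contains_eq_isSome_get?, hc]
      by_cases h0 : p.count c = 0 <;> simp [h0]
    have hinv' : ∀ c', (d.insert c ((p.count c : Int) + 1)).get? c' =
        if (p ++ [c]).count c' = 0 then none else some (((p ++ [c]).count c' : Int)) := by
      intro c'
      rw [PySem.Dict.get?_insert]
      by_cases hcc : c' = c
      · subst hcc
        simp [List.count_append]
      · rw [if_neg hcc, hinv c']
        have : (p ++ [c]).count c' = p.count c' := by
          simp [List.count_append, List.count_singleton, Ne.symm hcc]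
        rw [this]
    simp only [List.foldl_cons, pvSpecGo]
    by_cases h0 : p.count c = 0
    · -- fresh char: else branch of A, append c; spec: count ≠ 1
      have : pvStepA (d, res) c = (d.insert c 1, res ++ [c]) := by
        simp [pvStepA, hcont, h0]
      rw [this]
      have h1 : (1 : Int) = (p.count c : Int) + 1 := by rw [h0]; simp
      rw [h1, ih (p ++ [c]) _ _ hinv']
      simp [h0]
    · -- seen char
      have hstep : pvStepA (d, res) c =
          (d.insert c ((p.count c : Int) + 1),
           res ++ [if p.count c = 1 then '$' else c]) := by
        simp only [pvStepA, hcont, hgd, PySem.Dict.getD_insert_self]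
        rcases eq_or_ne (p.count c) 1 with h1 | h1
        · simp [h0, h1]
        · have h2 : ¬ ((p.count c : Int) + 1 = 2) := by omega
          simp [h0, h1, h2]
      rw [hstep, ih (p ++ [c]) _ _ hinv']
      simp

lemma pvB_go (rest : List Char) : ∀ (p : List Char) (k : Int) (d : PySem.Dict Char Int) (rp : PySem.Set Int),
    (∀ c, d.getD c 0 = (p.count c : Int)) →
    ∀ x : Int,
      (x ∈ ((PySem.List.enumerate rest k).foldl pvStepB (d, rp)).2 ↔
        x ∈ rp ∨ ∃ j : Nat, ∃ _ : j < rest.length, x = k + j ∧ (p ++ rest.take j).count rest[j] = 1) := by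
  induction rest with
  | nil => intro p k d rp _ x; simp [PySem.List.enumerate_nil]
  | cons c rest ih =>
    intro p k d rp hinv x
    have hinv' : ∀ c', (d.insert c (d.getD c 0 + 1)).getD c' 0 = (((p ++ [c]).count c' : Nat) : Int) := by
      intro c'
      rw [PySem.Dict.getD_insert]
      by_cases hcc : c' = c
      · subst hcc; rw [hinv c']; simp [List.count_append]
      · rw [if_neg hcc, hinv c']
        have : (p ++ [c]).count c' = p.count c' := by
          simp [List.count_append, List.count_singleton, Ne.symm hcc]
        rw [this]
    rw [PySem.List.enumerate_cons]
    simp only [List.foldl_cons]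
    have hstep : pvStepB (d, rp) (k, c) =
        (d.insert c (d.getD c 0 + 1),
         if p.count c = 1 then rp.add k else rp) := by
      simp only [pvStepB, PySem.Dict.getD_insert_self, hinv c]
      rcases eq_or_ne (p.count c) 1 with h1 | h1
      · simp [h1]
      · have h2 : ¬ ((p.count c : Int) + 1 = 2) := by omega
        simp [h1, h2]
    rw [hstep, ih (p ++ [c]) (k + 1) _ _ hinv' x]
    constructor
    · rintro (hx | ⟨j, hj, hxv, hcnt⟩)
      · by_cases h1 : p.count c = 1
        · rw [if_pos h1, PySem.Set.mem_add] at hx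
          rcases hx with hx | hx
          · exact Or.inl hx
          · refine Or.inr ⟨0, by simp, by simpa using hx, by simpa using h1⟩
        · rw [if_neg h1] at hx; exact Or.inl hx
      · refine Or.inr ⟨j + 1, by simpa using hj, by push_cast; omega, ?_⟩
        simpa [List.count_append] using hcnt
    · rintro (hx | ⟨j, hj, hxv, hcnt⟩)
      · refine Or.inl ?_
        by_cases h1 : p.count c = 1
        · rw [if_pos h1, PySem.Set.mem_add]; exact Or.inl hx
        · rwa [if_neg h1]
      · match j with
        | 0 =>
          refine Or.inl ?_
          simp only [List.take_zero, List.append_nil, List.getElem_cons_zero] at hcnt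
          rw [if_pos hcnt, PySem.Set.mem_add]
          exact Or.inr (by simpa using hxv)
        | j + 1 =>
          refine Or.inr ⟨j, by simpa using hj, by push_cast at hxv ⊢; omega, ?_⟩
          simpa [List.count_append] using hcnt

lemma pvMap_go (rest : List Char) : ∀ (p : List Char) (k : Int) (pos : PySem.Set Int),
    (∀ (j : Nat), j < rest.length → (((k + j : Int) ∈ pos) ↔ (p ++ rest.take j).count rest[j]! = 1)) →
    (PySem.List.enumerate rest k).map (fun q => if pos.contains q.1 then '$' else q.2) = pvSpecGo p rest := by
  induction rest with
  | nil => intro p k pos _; simp [PySem.List.enumerate_nil, pvSpecGo]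
  | cons c rest ih =>
    intro p k pos hpos
    rw [PySem.List.enumerate_cons]
    simp only [List.map_cons, pvSpecGo]
    have h0 := hpos 0 (by simp)
    simp only [Nat.cast_zero, add_zero, List.take_zero, List.append_nil,
      List.getElem!_cons_zero] at h0
    have hcont : pos.contains k = decide (p.count c = 1) := by
      simp only [PySem.Set.contains, List.contains_eq_mem, decide_eq_decide]
      exact h0
    congr 1
    · rw [hcont]
      by_cases h1 : p.count c = 1 <;> simp [h1]
    · refine ih (p ++ [c]) (k + 1) pos ?_
      intro j hj
      have := hpos (j + 1) (by simpa using hj)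
      simp only [List.take_succ_cons, List.getElem!_cons_succ] at this
      rw [show (k + 1 + (j : Int)) = k + ((j : Nat) + 1 : Nat) by push_cast; ring]
      rw [this]
      simp [List.count_append]

-- ===== VERDICT (by name: the statement is the Claim_ definition above) =====
theorem replace_duplicate_occurrence_spec : Claim_equal_replace_duplicate_occurrence := by
  intro s _
  unfold Spec_replace_duplicate_occurrence
  show String.mk (s.toList.foldl pvStepA (PySem.Dict.empty, [])).2
      = String.mk ((PySem.List.enumerate s.toList).map
          (fun p => if (((PySem.List.enumerate s.toList).foldl pvStepB
              (PySem.Dict.empty, PySem.Set.empty)).2).contains p.1 then '$' else p.2))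
  have hA := pvA_go s.toList [] PySem.Dict.empty []
    (by intro c; simp [PySem.Dict.get?_empty])
  have hB := pvB_go s.toList [] 0 PySem.Dict.empty PySem.Set.empty
    (by intro c; simp [PySem.Dict.getD_empty])
  simp only [List.nil_append] at hA
  rw [hA]
  congr 1
  symm
  refine pvMap_go s.toList [] 0 _ ?_
  intro j hj
  rw [hB]
  have hget : s.toList[j]! = s.toList[j] := by
    rw [List.getElem!_eq_getElem?_getD, List.getElem?_eq_getElem hj]
    rfl
  constructor
  · rintro (hx | ⟨j', hj', hxv, hcnt⟩)
    · simp [PySem.Set.empty] at hx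
    · have : j' = j := by
        simp only [zero_add] at hxv
        exact_mod_cast hxv.symm
      subst this
      rw [hget]
      simpa using hcnt
  · intro hcnt
    exact Or.inr ⟨j, hj, by simp, by rw [hget] at hcnt; simpa using hcnt⟩
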